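-- pv_equiv track=rewrite | github.com/BrodyFoy/urine-drug-test-interpretation | interpret/classifier/utility.py | sentence_from_list
-- ===== SOURCE A (Python) =====
-- from typing import Dict, Iterable, List, Callable
--
-- def sentence_from_list(item_list: Iterable[str], use_or=False, only_commas=False):
--     """
--         Builds a string from a list of items, for example:
--
--         input: [Fentanyl, Hydrocodone]
--
--         output: "fentanyl, and hydrocodone"
--
--         use_or: when set to true, the items will be join with 'or' instead of 'and'
--     """
--     output = ""
--     for idx, item in enumerate(item_list):
--         name = item
--         if len(item_list) - 1 == 0:
--             output += name
--         elif idx >= len(item_list) - 1: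
--             if not only_commas:
--                 output = output.removesuffix(", ")
--                 output += f" {'and' if not use_or else 'or'} {name}"
--             else:
--                 output += name
--         else:
--             output += f"{name}, "
--     return output
-- ===== SOURCE B (Python) =====
-- def sentence_from_list(item_list, use_or=False, only_commas=False):
--     conj = 'or' if use_or else 'and'
--     if only_commas or len(item_list) < 2:
--         return ', '.join(item_list)
--     return ', '.join(item_list[:-1]) + f' {conj} ' + item_list[-1]
-- ===== Notes on version B (the rewrite author's own statement) =====
-- stated objective: simpler
-- what changed: Replaces the index-tracking enumerate loop with its removesuffix repair by a direct ', '.join of all-but-last plus the conjunction and the last item (plain join for the comma-only/short cases).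
import Mathlib
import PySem

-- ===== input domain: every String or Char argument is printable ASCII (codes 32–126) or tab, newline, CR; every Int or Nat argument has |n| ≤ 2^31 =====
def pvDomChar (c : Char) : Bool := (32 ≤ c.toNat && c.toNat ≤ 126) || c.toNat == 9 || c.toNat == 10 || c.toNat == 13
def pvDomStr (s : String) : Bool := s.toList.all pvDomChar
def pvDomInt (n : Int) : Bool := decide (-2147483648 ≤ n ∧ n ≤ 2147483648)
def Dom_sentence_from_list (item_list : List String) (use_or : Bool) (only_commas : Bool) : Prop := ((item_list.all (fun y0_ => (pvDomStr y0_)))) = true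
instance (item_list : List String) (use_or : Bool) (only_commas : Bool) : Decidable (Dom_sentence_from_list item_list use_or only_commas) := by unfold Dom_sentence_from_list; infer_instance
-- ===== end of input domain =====

-- B joins all-but-last with ', ' and appends the conjunction and last item, instead of A's
-- enumerate loop that tracks the index and repairs the trailing ', ' with removesuffix (simpler).

-- ===== PORT A =====
-- str.removesuffix(", ") ported by hand (exact: drop the suffix iff the string ends with it)
def pvRemovesuffix (cs suf : List Char) : List Char :=
  if suf <:+ cs then cs.take (cs.length - suf.length) else cs

-- the body of A's 'for idx, item in enumerate(item_list)' loop, step for step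
def pvAStep (n : Int) (use_or only_commas : Bool) (output : List Char) (p : Int × String) : List Char :=
  if n - 1 = 0 then output ++ p.2.toList
  else if p.1 ≥ n - 1 then
    (if only_commas = false then
      pvRemovesuffix output [',', ' '] ++
        (' ' :: (if use_or = false then ['a','n','d'] else ['o','r']) ++ ' ' :: p.2.toList)
    else output ++ p.2.toList)
  else output ++ (p.2.toList ++ [',', ' '])

def sentence_from_list (item_list : List String) (use_or : Bool) (only_commas : Bool) : String :=
  String.ofList ((PySem.List.enumerate item_list 0).foldl
    (pvAStep (item_list.length : Int) use_or only_commas) [])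

-- ===== PORT B =====
def sentence_from_list_alt (item_list : List String) (use_or : Bool) (only_commas : Bool) : String :=
  let conj : List Char := if use_or then ['o','r'] else ['a','n','d']
  if only_commas = true ∨ item_list.length < 2 then PySem.Str.join ", " item_list
  else String.ofList ((PySem.Str.join ", " item_list.dropLast).toList ++
    ' ' :: conj ++ ' ' :: (item_list.getLastD "").toList)

-- ===== PRECONDITION & SPEC =====
def Spec_sentence_from_list (item_list : List String) (use_or : Bool) (only_commas : Bool) (out : String) : Prop := out = sentence_from_list_alt item_list use_or only_commas
instance (item_list : List String) (use_or : Bool) (only_commas : Bool) (out : String) : Decidable (Spec_sentence_from_list item_list use_or only_commas out) := by unfold Spec_sentence_from_list; infer_instance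

-- ===== CLAIM (what is proved, stated in full; the proofs are below) =====
def Claim_equal_sentence_from_list : Prop := ∀ (item_list : List String) (use_or : Bool) (only_commas : Bool), Dom_sentence_from_list item_list use_or only_commas → Spec_sentence_from_list item_list use_or only_commas (sentence_from_list item_list use_or only_commas)

-- ===== LEMMAS AND PROOFS =====

lemma pv_enum_append (xs : List String) (y : String) (s : Int) :
    PySem.List.enumerate (xs ++ [y]) s
      = PySem.List.enumerate xs s ++ [((s + xs.length : Int), y)] := by
  induction xs generalizing s with
  | nil => simp [PySem.List.enumerate, PySem.List.enumerate_cons]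
  | cons a t ih =>
      simp only [List.cons_append, PySem.List.enumerate_cons, ih, List.length_cons]
      push_cast
      ring_nf

lemma pv_prefix_loop (n : Int) (u oc : Bool) (hn : ¬ n - 1 = 0) :
    ∀ (xs : List String) (s : Int) (acc : List Char), s + xs.length ≤ n - 1 →
      (PySem.List.enumerate xs s).foldl (pvAStep n u oc) acc
        = acc ++ ((xs.map String.toList).map (fun x => x ++ [',', ' '])).flatten := by
  intro xs
  induction xs with
  | nil => intro s acc _; simp [PySem.List.enumerate]
  | cons a t ih =>
      intro s acc h
      have hlt : ¬ (s ≥ n - 1) := by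
        simp only [List.length_cons] at h; push_cast at h; omega
      rw [PySem.List.enumerate_cons, List.foldl_cons]
      have hb : (s + 1) + (t.length : Int) ≤ n - 1 := by
        simp only [List.length_cons] at h; push_cast at h ⊢; omega
      rw [ih (s + 1) _ hb]
      simp [pvAStep, hn, hlt]

lemma pv_inter_cons_cons (sep a b : List Char) (l : List (List Char)) :
    sep.intercalate (a :: b :: l) = a ++ sep ++ sep.intercalate (b :: l) := by
  simp [List.intercalate, List.intersperse]

lemma pv_flatten_sep (sep : List Char) :
    ∀ (xs : List (List Char)), xs ≠ [] →
      (xs.map (fun x => x ++ sep)).flatten = sep.intercalate xs ++ sep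
  | [], hx => absurd rfl hx
  | [x], _ => by simp [List.intercalate]
  | x :: y :: t, _ => by
      rw [List.map_cons, List.flatten_cons, pv_flatten_sep sep (y :: t) (by simp),
        pv_inter_cons_cons]
      simp

lemma pv_inter_append (sep : List Char) :
    ∀ (xs : List (List Char)) (y : List Char), xs ≠ [] →
      sep.intercalate (xs ++ [y]) = sep.intercalate xs ++ sep ++ y
  | [], y, hx => absurd rfl hx
  | [x], y, _ => by simp [List.intercalate]
  | x :: b :: t, y, _ => by
      rw [List.cons_append, List.cons_append, pv_inter_cons_cons,
        ← List.cons_append, pv_inter_append sep (b :: t) y (by simp), pv_inter_cons_cons]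
      simp

lemma pv_removesuffix_append (w : List Char) :
    pvRemovesuffix (w ++ [',', ' ']) [',', ' '] = w := by
  unfold pvRemovesuffix
  rw [if_pos (List.suffix_append _ _)]
  simp

-- ===== VERDICT (by name: the statement is the Claim_ definition above) =====
theorem sentence_from_list_spec : Claim_equal_sentence_from_list := by
  intro l u oc _
  unfold Spec_sentence_from_list
  apply String.toList_inj.mp
  match l with
  | [] =>
      simp [sentence_from_list, sentence_from_list_alt, PySem.List.enumerate,
        PySem.Str.toList_join, PySem.Chars.join, List.intercalate]
  | [a] =>
      simp [sentence_from_list, sentence_from_list_alt, PySem.List.enumerate,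
        pvAStep, PySem.Str.toList_join, PySem.Chars.join, List.intercalate]
  | a :: b :: t =>
      have hne : (a :: b :: t) ≠ [] := by simp
      have hsplit := List.dropLast_append_getLast hne
      have hnlen : ((a :: b :: t).length : Int) = (a :: b :: t).dropLast.length + 1 := by
        rw [List.length_dropLast]; simp
      have hn : ¬ ((a :: b :: t).length : Int) - 1 = 0 := by
        simp only [List.length_cons]; push_cast; omega
      have hinit : (a :: b :: t).dropLast ≠ [] := by simp
      have hinit' : (a :: b :: t).dropLast.map String.toList ≠ [] := by
        simp
      have hlastD : (a :: b :: t).getLastD "" = (a :: b :: t).getLast hne := by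
        rw [List.getLastD_eq_getLast?, List.getLast?_eq_some_getLast (h := hne)]; rfl
      rw [sentence_from_list]
      conv_lhs => rw [show PySem.List.enumerate (a :: b :: t) 0
        = PySem.List.enumerate ((a :: b :: t).dropLast ++ [(a :: b :: t).getLast hne]) 0 from by
          rw [hsplit]]
      rw [pv_enum_append, String.toList_ofList, List.foldl_append, List.foldl_cons,
        List.foldl_nil]
      rw [pv_prefix_loop _ _ _ hn _ 0 [] (by rw [hnlen]; omega)]
      rw [List.nil_append, pv_flatten_sep _ _ hinit']
      have hidx : (0 : Int) + ((a :: b :: t).dropLast.length : Int) ≥ ((a :: b :: t).length : Int) - 1 := by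
        rw [hnlen]; omega
      unfold pvAStep
      rw [if_neg hn, if_pos hidx]
      cases oc with
      | true =>
          rw [if_neg (show ¬((true : Bool) = false) by simp)]
          simp only [sentence_from_list_alt]
          rw [if_pos (show (True ∨ (a :: b :: t).length < 2) from Or.inl trivial)]
          rw [PySem.Str.toList_join]
          simp only [PySem.Chars.join]
          conv_rhs => rw [← hsplit]
          rw [List.map_append, List.map_singleton, pv_inter_append _ _ _ hinit']
          simp
      | false =>
          rw [if_pos (show (false : Bool) = false from rfl)]
          rw [pv_removesuffix_append]
          simp only [sentence_from_list_alt]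
          have hc : ¬ ((false : Bool) = true ∨ (a :: b :: t).length < 2) := by simp
          rw [if_neg hc]
          rw [String.toList_ofList, PySem.Str.toList_join]
          simp only [PySem.Chars.join]
          rw [hlastD]
          cases u <;> simp
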